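-- pv_equiv track=rewrite | github.com/ngraymon/termfactory | new/prototype.py | _older_fancy_string
-- ===== SOURCE A (Python) =====
-- letter_array = ['a', 'b', 'c', 'd', 'e', 'f']
--
-- def _older_fancy_string(constraint):
--     """ x """
--     c_string = " + ".join([
--         f"{n: d}{letter_array[i]}"
--         for i, n in enumerate(constraint)
--     ])
--     c_string = c_string.replace('+ -', '- ')
--     c_string = c_string.replace('+  ', '+ ')
--     return c_string
-- ===== SOURCE B (Python) =====
-- letter_array = ['a', 'b', 'c', 'd', 'e', 'f']
--
-- def _older_fancy_string(constraint):
--     """ x """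
--     parts = []
--     for i, n in enumerate(constraint):
--         term = str(abs(n)) + letter_array[i]
--         if not parts:
--             parts.append((" " if n >= 0 else "-") + term)
--         else:
--             parts.append((" + " if n >= 0 else " - ") + term)
--     return "".join(parts)
-- ===== Notes on version B (the rewrite author's own statement) =====
-- stated objective: simpler
-- what changed: B drops the join-then-double-replace string post-processing and instead decides each element's sign/connective directly (first element vs later, n>=0 vs n<0) while building the parts list in one pass.
import Mathlib
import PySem

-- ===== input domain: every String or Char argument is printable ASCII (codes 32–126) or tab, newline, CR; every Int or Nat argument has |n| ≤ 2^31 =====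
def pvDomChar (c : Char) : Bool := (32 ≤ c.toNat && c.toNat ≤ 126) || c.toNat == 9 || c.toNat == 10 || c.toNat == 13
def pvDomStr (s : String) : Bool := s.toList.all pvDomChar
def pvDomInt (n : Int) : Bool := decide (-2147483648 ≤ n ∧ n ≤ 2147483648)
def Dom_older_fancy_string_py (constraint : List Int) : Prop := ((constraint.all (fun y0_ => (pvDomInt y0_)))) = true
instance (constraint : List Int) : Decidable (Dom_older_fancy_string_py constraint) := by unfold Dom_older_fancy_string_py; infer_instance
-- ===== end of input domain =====

-- B replaces A's join-then-double-`.replace` post-processing by a single pass that picks each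
-- element's sign/connective directly; objective: simpler (no speed claim).


-- ===== PORT A =====
def letter_array : List Char := ['a', 'b', 'c', 'd', 'e', 'f']

-- f"{n: d}" is ported by hand (exact for int n): ' ' ++ str(n) for n >= 0, str(n) (= '-' ++ digits) for n < 0.
-- letter_array[i] is PySem.List.pyGetD (IndexError for i >= 6 is excluded by Pre_; the default is never reached there).
def older_fancy_string_py (constraint : List Int) : String :=
  let c1 := PySem.Str.join " + " ((PySem.List.enumerate constraint).map (fun p =>
    String.ofList ((if p.2 < 0 then PySem.Int.toChars p.2 else ' ' :: PySem.Int.toChars p.2)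
      ++ [PySem.List.pyGetD letter_array p.1 'a'])))
  let c2 := PySem.Str.replace c1 "+ -" "- "
  PySem.Str.replace c2 "+  " "+ "

-- ===== PORT B =====
def older_fancy_string_py_alt (constraint : List Int) : String :=
  let parts := (PySem.List.enumerate constraint).foldl (fun parts p =>
    let term := PySem.Int.toChars |p.2| ++ [PySem.List.pyGetD letter_array p.1 'a']
    parts ++ [String.ofList ((if parts.isEmpty then (if 0 ≤ p.2 then [' '] else ['-'])
                              else (if 0 ≤ p.2 then [' ', '+', ' '] else [' ', '-', ' '])) ++ term)]) []
  PySem.Str.join "" parts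

-- ===== PRECONDITION & SPEC =====
-- Pre_ excludes exactly the inputs on which Python A raises IndexError (more than 6 coefficients: letter_array has 6 letters).
def Pre_older_fancy_string_py (constraint : List Int) : Prop := constraint.length ≤ 6
instance (constraint : List Int) : Decidable (Pre_older_fancy_string_py constraint) := by unfold Pre_older_fancy_string_py; infer_instance
def pvWitness_older_fancy_string_py : List Int := [3, -4, 0]
def Spec_older_fancy_string_py (constraint : List Int) (out : String) : Prop := out = older_fancy_string_py_alt constraint
instance (constraint : List Int) (out : String) : Decidable (Spec_older_fancy_string_py constraint out) := by unfold Spec_older_fancy_string_py; infer_instance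

-- ===== CLAIM (what is proved, stated in full; the proofs are below) =====
def Claim_equal_older_fancy_string_py : Prop := ∀ (constraint : List Int), Dom_older_fancy_string_py constraint → Pre_older_fancy_string_py constraint → Spec_older_fancy_string_py constraint (older_fancy_string_py constraint)

-- ===== LEMMAS AND PROOFS =====
-- go abbreviation: replace.go with fuel = length of the remaining input (its canonical form)
def rgo (old new u acc : List Char) : List Char := PySem.Chars.replace.go old new u.length u acc

theorem go_nil (old new acc : List Char) (f : Nat) : PySem.Chars.replace.go old new f [] acc = acc.reverse := by
  cases f <;> simp [PySem.Chars.replace.go]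

theorem go_fuel (old new : List Char) (hold : old ≠ []) :
    ∀ (f : Nat) (l acc : List Char), l.length ≤ f → PySem.Chars.replace.go old new f l acc = rgo old new l acc := by
  intro f
  induction f using Nat.strong_induction_on with
  | _ f ih =>
    intro l acc hl
    match f, l with
    | f, [] => simp [rgo, go_nil]
    | 0, c :: t => simp at hl
    | f + 1, c :: t =>
      have h1 : 1 ≤ old.length := by cases old <;> simp_all
      simp only [List.length_cons] at hl
      by_cases h : old.isPrefixOf (c :: t)
      · rw [show PySem.Chars.replace.go old new (f+1) (c::t) acc
              = PySem.Chars.replace.go old new f ((c::t).drop old.length) (new.reverse ++ acc) by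
            simp [PySem.Chars.replace.go, h]]
        rw [ih f (by omega) _ _ (by simp only [List.length_drop, List.length_cons]; omega)]
        rw [show rgo old new (c::t) acc
              = PySem.Chars.replace.go old new t.length ((c::t).drop old.length) (new.reverse ++ acc) by
            simp [rgo, PySem.Chars.replace.go, h]]
        rw [ih t.length (by omega) _ _ (by simp only [List.length_drop, List.length_cons]; omega)]
      · rw [show PySem.Chars.replace.go old new (f+1) (c::t) acc
              = PySem.Chars.replace.go old new f t (c :: acc) by simp [PySem.Chars.replace.go, h]]
        rw [ih f (by omega) _ _ (by omega)]
        simp only [rgo, List.length_cons]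
        simp [PySem.Chars.replace.go, h]

theorem rgo_nil (old new acc : List Char) : rgo old new [] acc = acc.reverse := by
  simp [rgo, go_nil]

theorem rgo_skip1 (old new : List Char) (c : Char) (t acc : List Char) (h : ¬ old.isPrefixOf (c :: t)) :
    rgo old new (c :: t) acc = rgo old new t (c :: acc) := by
  simp [rgo, PySem.Chars.replace.go, h]

theorem rgo_match (old new : List Char) (hold : old ≠ []) (c : Char) (t acc : List Char)
    (h : old.isPrefixOf (c :: t)) :
    rgo old new (c :: t) acc = rgo old new ((c :: t).drop old.length) (new.reverse ++ acc) := by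
  have h1 : 1 ≤ old.length := by cases old <;> simp_all
  rw [show rgo old new (c::t) acc
        = PySem.Chars.replace.go old new t.length ((c::t).drop old.length) (new.reverse ++ acc) by
      simp [rgo, PySem.Chars.replace.go, h]]
  exact go_fuel old new hold t.length _ _ (by simp [List.length_drop]; omega)

theorem rgo_skipAll (hd : Char) (tl new : List Char) :
    ∀ (s u acc : List Char), (∀ c ∈ s, c ≠ hd) →
      rgo (hd :: tl) new (s ++ u) acc = rgo (hd :: tl) new u (s.reverse ++ acc) := by
  intro s
  induction s with
  | nil => simp
  | cons c s ih =>
    intro u acc hs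
    rw [List.cons_append, rgo_skip1 _ _ _ _ _ (by
      simp [List.isPrefixOf]
      intro hc
      exact absurd hc.symm (hs c (by simp)))]
    rw [ih u (c :: acc) (fun x hx => hs x (by simp [hx]))]
    simp

-- one replace pass over s0 ++ (segments): s0 is copied, each (a, b) segment rewrites a to b
def SegOk (old new a b : List Char) : Prop := ∀ u acc, rgo old new (a ++ u) acc = rgo old new u (b.reverse ++ acc)

theorem rgo_chain (old new : List Char) :
    ∀ (segs : List (List Char × List Char)), (∀ p ∈ segs, SegOk old new p.1 p.2) → ∀ acc,
      rgo old new (segs.map Prod.fst).flatten acc = acc.reverse ++ (segs.map Prod.snd).flatten := by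
  intro segs
  induction segs with
  | nil => simp [rgo_nil]
  | cons p rest ih =>
    intro h acc
    simp only [List.map_cons, List.flatten_cons]
    rw [h p (by simp) (rest.map Prod.fst).flatten acc]
    rw [ih (fun q hq => h q (by simp [hq])) _]
    simp

theorem replace_structured (hd : Char) (tl new s0 : List Char) (segs : List (List Char × List Char))
    (h0 : ∀ c ∈ s0, c ≠ hd) (hs : ∀ p ∈ segs, SegOk (hd :: tl) new p.1 p.2) :
    PySem.Chars.replace (s0 ++ (segs.map Prod.fst).flatten) (hd :: tl) new
      = s0 ++ (segs.map Prod.snd).flatten := by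
  rw [show PySem.Chars.replace (s0 ++ (segs.map Prod.fst).flatten) (hd :: tl) new
        = rgo (hd :: tl) new (s0 ++ (segs.map Prod.fst).flatten) [] by
      simp [PySem.Chars.replace, rgo]]
  rw [rgo_skipAll hd tl new s0 _ [] h0, rgo_chain _ _ segs hs]
  simp
-- the pieces both ports' outputs are made of
def sgn (n : Int) : Char := if n < 0 then '-' else ' '
def dg (n : Int) : List Char := Nat.toDigits 10 n.natAbs
def ltr (i : Int) : Char := PySem.List.pyGetD letter_array i 'a'
def tACh (i n : Int) : List Char := sgn n :: (dg n ++ [ltr i])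
def segJ (i n : Int) : List Char := [' ', '+', ' '] ++ tACh i n
def seg1 (i n : Int) : List Char :=
  if n < 0 then [' ', '-', ' '] ++ (dg n ++ [ltr i]) else [' ', '+', ' ', ' '] ++ (dg n ++ [ltr i])
def seg2 (i n : Int) : List Char :=
  (if n < 0 then [' ', '-', ' '] else [' ', '+', ' ']) ++ (dg n ++ [ltr i])

theorem digitChar_ne_plus (m : Nat) : Nat.digitChar m ≠ '+' := by
  by_cases h : m < 16
  · revert h; revert m; decide
  · rw [Nat.digitChar]
    repeat rw [if_neg (by omega)]
    decide

theorem toDigitsCore_ne_plus :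
    ∀ (f n : Nat) (ds : List Char), (∀ c ∈ ds, c ≠ '+') → ∀ c ∈ Nat.toDigitsCore 10 f n ds, c ≠ '+' := by
  intro f
  induction f with
  | zero => intro n ds h c hc; exact h c (by simpa [Nat.toDigitsCore] using hc)
  | succ f ih =>
    intro n ds h c hc
    simp only [Nat.toDigitsCore] at hc
    by_cases h10 : n / 10 = 0
    · simp only [h10, if_pos] at hc
      rcases List.mem_cons.mp hc with rfl | hc'
      · exact digitChar_ne_plus _
      · exact h c hc' 
    · simp only [h10, ite_false] at hc
      refine ih _ _ ?_ c hc
      intro x hx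
      rcases List.mem_cons.mp hx with rfl | hx'
      · exact digitChar_ne_plus _
      · exact h x hx' 

theorem dg_ne_plus (n : Int) : ∀ c ∈ dg n, c ≠ '+' :=
  toDigitsCore_ne_plus _ _ [] (by simp)

theorem ltr_ne_plus (i : Int) : ltr i ≠ '+' := by
  unfold ltr PySem.List.pyGetD
  cases h : PySem.List.pyGet? letter_array i with
  | none => simp [Option.getD]
  | some c =>
    have hm := PySem.List.mem_of_pyGet?_eq_some letter_array h
    simp only [Option.getD]
    simp only [letter_array, List.mem_cons] at hm
    rcases hm with rfl | rfl | rfl | rfl | rfl | hm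
    · decide
    · decide
    · decide
    · decide
    · decide
    · simp at hm; subst hm; decide

theorem tACh_ne_plus (i n : Int) : ∀ c ∈ tACh i n, c ≠ '+' := by
  intro c hc
  simp only [tACh, sgn, List.mem_cons, List.mem_append] at hc
  rcases hc with rfl | hc | hc
  · split_ifs <;> decide
  · exact dg_ne_plus n c hc
  · rcases hc with rfl | hc
    · exact ltr_ne_plus i
    · cases hc

theorem segok1 (i n : Int) : SegOk ['+', ' ', '-'] ['-', ' '] (segJ i n) (seg1 i n) := by
  intro u acc
  by_cases hn : n < 0
  · simp only [segJ, tACh, sgn, seg1, if_pos hn, List.cons_append, List.nil_append, List.append_assoc]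
    rw [rgo_skip1 _ _ _ _ _ (by simp [List.isPrefixOf])]
    rw [rgo_match _ _ (by simp) _ _ _ (by simp [List.isPrefixOf])]
    simp only [List.length_cons, List.length_nil, List.drop_succ_cons, List.drop_zero]
    rw [show dg n ++ ltr i :: u = (dg n ++ [ltr i]) ++ u by simp]
    rw [rgo_skipAll '+' [' ', '-'] ['-', ' '] (dg n ++ [ltr i]) u _ (by
      intro c hc
      rcases List.mem_append.mp hc with hc | hc
      · exact dg_ne_plus n c hc
      · simp at hc; subst hc; exact ltr_ne_plus i)]
    simp
  · simp only [segJ, tACh, sgn, seg1, if_neg hn, List.cons_append, List.nil_append, List.append_assoc]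
    rw [rgo_skip1 _ _ _ _ _ (by simp [List.isPrefixOf])]
    rw [rgo_skip1 _ _ _ _ _ (by simp [List.isPrefixOf])]
    rw [rgo_skip1 _ _ _ _ _ (by simp [List.isPrefixOf])]
    rw [rgo_skip1 _ _ _ _ _ (by simp [List.isPrefixOf])]
    rw [show dg n ++ ltr i :: u = (dg n ++ [ltr i]) ++ u by simp]
    rw [rgo_skipAll '+' [' ', '-'] ['-', ' '] (dg n ++ [ltr i]) u _ (by
      intro c hc
      rcases List.mem_append.mp hc with hc | hc
      · exact dg_ne_plus n c hc
      · simp at hc; subst hc; exact ltr_ne_plus i)]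
    simp

theorem segok2 (i n : Int) : SegOk ['+', ' ', ' '] ['+', ' '] (seg1 i n) (seg2 i n) := by
  intro u acc
  by_cases hn : n < 0
  · simp only [seg1, seg2, if_pos hn, List.cons_append, List.nil_append, List.append_assoc]
    rw [show (' ' :: '-' :: ' ' :: (dg n ++ ltr i :: u)) = ([' ', '-', ' '] ++ (dg n ++ [ltr i])) ++ u by simp]
    rw [rgo_skipAll '+' [' ', ' '] ['+', ' '] ([' ', '-', ' '] ++ (dg n ++ [ltr i])) u _ (by
      intro c hc
      simp only [List.mem_append, List.mem_cons] at hc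
      rcases hc with (rfl | rfl | rfl | hc) | hc | hc
      · decide
      · decide
      · decide
      · simp at hc
      · exact dg_ne_plus n c hc
      · rcases hc with rfl | hc
        · exact ltr_ne_plus i
        · cases hc)]
    simp
  · simp only [seg1, seg2, if_neg hn, List.cons_append, List.nil_append, List.append_assoc]
    rw [rgo_skip1 _ _ _ _ _ (by simp [List.isPrefixOf])]
    rw [rgo_match _ _ (by simp) _ _ _ (by simp [List.isPrefixOf])]
    simp only [List.length_cons, List.length_nil, List.drop_succ_cons, List.drop_zero]
    rw [show dg n ++ ltr i :: u = (dg n ++ [ltr i]) ++ u by simp]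
    rw [rgo_skipAll '+' [' ', ' '] ['+', ' '] (dg n ++ [ltr i]) u _ (by
      intro c hc
      rcases List.mem_append.mp hc with hc | hc
      · exact dg_ne_plus n c hc
      · simp at hc; subst hc; exact ltr_ne_plus i)]
    simp

theorem join_cons (sep a : List Char) (l : List (List Char)) :
    PySem.Chars.join sep (a :: l) = a ++ (l.map (fun t => sep ++ t)).flatten := by
  simp only [PySem.Chars.join]
  induction l generalizing a <;> simp_all [List.intercalate]

theorem join_empty_sep (l : List (List Char)) : PySem.Chars.join [] l = l.flatten := by
  cases l with
  | nil => rfl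
  | cons a t => rw [join_cons]; simp

theorem enumerate_cons (xs : List Int) (x s : Int) :
    PySem.List.enumerate (x :: xs) s = (s, x) :: PySem.List.enumerate xs (s + 1) := by
  simp [PySem.List.enumerate]

theorem termA_eq (i n : Int) :
    (if n < 0 then PySem.Int.toChars n else ' ' :: PySem.Int.toChars n)
      ++ [PySem.List.pyGetD letter_array i 'a'] = tACh i n := by
  by_cases hn : n < 0
  · simp [PySem.Int.toChars, tACh, sgn, dg, ltr, hn]
  · simp only [if_neg hn, PySem.Int.toChars, tACh, sgn, dg, ltr]
    rw [show n.toNat = n.natAbs by omega]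
    simp

theorem termB_eq (i n : Int) :
    (if (0:Int) ≤ n then [' '] else ['-'])
      ++ (PySem.Int.toChars |n| ++ [PySem.List.pyGetD letter_array i 'a']) = tACh i n := by
  have habs : PySem.Int.toChars |n| = dg n := by
    simp only [PySem.Int.toChars, dg]
    rw [if_neg (not_lt.mpr (abs_nonneg n))]
    rw [show |n|.toNat = n.natAbs by rcases abs_cases n with ⟨h1,h2⟩|⟨h1,h2⟩ <;> omega]
  rw [habs]
  by_cases hn : n < 0
  · rw [if_neg (by omega)]; simp [tACh, sgn, ltr, if_pos hn]
  · rw [if_pos (by omega)]; simp [tACh, sgn, ltr, if_neg hn]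

theorem segB_eq (i n : Int) :
    (if (0:Int) ≤ n then [' ', '+', ' '] else [' ', '-', ' '])
      ++ (PySem.Int.toChars |n| ++ [PySem.List.pyGetD letter_array i 'a']) = seg2 i n := by
  have habs : PySem.Int.toChars |n| = dg n := by
    simp only [PySem.Int.toChars, dg]
    rw [if_neg (not_lt.mpr (abs_nonneg n))]
    rw [show |n|.toNat = n.natAbs by rcases abs_cases n with ⟨h1,h2⟩|⟨h1,h2⟩ <;> omega]
  rw [habs]
  by_cases hn : n < 0
  · rw [if_neg (by omega)]; simp [seg2, ltr, if_pos hn]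
  · rw [if_pos (by omega)]; simp [seg2, ltr, if_neg hn]

theorem foldB (xs : List Int) : ∀ (s : Int) (ps : List String), ps ≠ [] →
    (PySem.List.enumerate xs s).foldl (fun parts p =>
      let term := PySem.Int.toChars |p.2| ++ [PySem.List.pyGetD letter_array p.1 'a']
      parts ++ [String.ofList ((if parts.isEmpty then (if 0 ≤ p.2 then [' '] else ['-'])
                                else (if 0 ≤ p.2 then [' ', '+', ' '] else [' ', '-', ' '])) ++ term)]) ps
    = ps ++ (PySem.List.enumerate xs s).map (fun p => String.ofList (seg2 p.1 p.2)) := by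
  induction xs with
  | nil => intro s ps _; simp [PySem.List.enumerate]
  | cons x xs ih =>
    intro s ps hps
    rw [enumerate_cons]
    simp only [List.foldl_cons, List.map_cons]
    rw [show ps.isEmpty = false by simpa [List.isEmpty_iff] using hps]
    simp only [Bool.false_eq_true, if_false]
    rw [ih (s + 1) (ps ++ [String.ofList ((if 0 ≤ x then [' ', '+', ' '] else [' ', '-', ' '])
          ++ (PySem.Int.toChars |x| ++ [PySem.List.pyGetD letter_array s 'a']))]) (by simp)]
    rw [segB_eq]
    simp

-- ===== VERDICT (by name: the statement is the Claim_ definition above) =====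
theorem older_fancy_string_py_spec : Claim_equal_older_fancy_string_py := by
  intro constraint _ _
  unfold Spec_older_fancy_string_py
  cases constraint with
  | nil => rfl
  | cons x xs =>
    apply String.toList_inj.mp
    simp only [older_fancy_string_py, older_fancy_string_py_alt]
    rw [PySem.Str.toList_replace, PySem.Str.toList_replace, PySem.Str.toList_join, PySem.Str.toList_join]
    rw [show (" + " : String).toList = [' ', '+', ' '] by decide]
    rw [show ("+ -" : String).toList = ['+', ' ', '-'] by decide]
    rw [show ("- " : String).toList = ['-', ' '] by decide]
    rw [show ("+  " : String).toList = ['+', ' ', ' '] by decide]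
    rw [show ("+ " : String).toList = ['+', ' '] by decide]
    rw [show ("" : String).toList = ([] : List Char) by decide]
    -- A side: the joined string is tACh 0 x followed by the " + "-separated terms
    rw [show ((PySem.List.enumerate (x :: xs) 0).map (fun p =>
          String.ofList ((if p.2 < 0 then PySem.Int.toChars p.2 else ' ' :: PySem.Int.toChars p.2)
            ++ [PySem.List.pyGetD letter_array p.1 'a']))).map String.toList
        = tACh 0 x :: (PySem.List.enumerate xs 1).map (fun p => tACh p.1 p.2) by
      rw [enumerate_cons, List.map_cons, List.map_cons, List.map_map]
      simp only [String.toList_ofList, Function.comp_def, termA_eq]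
      norm_num]
    rw [join_cons, List.map_map]
    rw [show ((PySem.List.enumerate xs 1).map ((fun t => [' ', '+', ' '] ++ t) ∘ (fun p => tACh p.1 p.2)))
        = ((PySem.List.enumerate xs 1).map (fun p => (segJ p.1 p.2, seg1 p.1 p.2))).map Prod.fst by
      simp [List.map_map, Function.comp_def, segJ]]
    rw [replace_structured '+' [' ', '-'] ['-', ' '] (tACh 0 x) _ (tACh_ne_plus 0 x) (by
      intro p hp
      simp only [List.mem_map] at hp
      obtain ⟨q, _, rfl⟩ := hp
      exact segok1 q.1 q.2)]
    rw [show ((PySem.List.enumerate xs 1).map (fun p => (segJ p.1 p.2, seg1 p.1 p.2))).map Prod.snd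
        = ((PySem.List.enumerate xs 1).map (fun p => (seg1 p.1 p.2, seg2 p.1 p.2))).map Prod.fst by
      simp [List.map_map, Function.comp_def]]
    rw [replace_structured '+' [' ', ' '] ['+', ' '] (tACh 0 x) _ (tACh_ne_plus 0 x) (by
      intro p hp
      simp only [List.mem_map] at hp
      obtain ⟨q, _, rfl⟩ := hp
      exact segok2 q.1 q.2)]
    -- B side: the fold produces tACh 0 x and one seg2 part per later element
    rw [enumerate_cons, List.foldl_cons]
    rw [show (([] : List String).isEmpty : Bool) = true by decide]
    simp only [if_pos, List.nil_append]
    rw [foldB xs (0 + 1) [String.ofList ((if 0 ≤ x then [' '] else ['-'])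
          ++ (PySem.Int.toChars |x| ++ [PySem.List.pyGetD letter_array 0 'a']))] (by simp)]
    rw [termB_eq]
    rw [join_empty_sep]
    simp [List.map_map, Function.comp_def]
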